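-- pv_equiv track=rewrite | github.com/jconorgrogan/Stern-Brocot-Tree-exploration | SternBrocotGenerator.py | sb_tree
-- ===== SOURCE A (Python) =====
-- from typing import List, Tuple
--
-- def sb_tree(rn: List[Tuple[int, int]], n: int) -> List[Tuple[int, int]]:
--     if not n:
--         return rn
--     def new_rn():
--         for i in range(len(rn) - 1):
--             yield from (rn[i], tuple(map(sum, zip(rn[i], rn[i+1]))))
--         yield rn[-1]
--     return sb_tree(list(new_rn()), n-1)
-- ===== SOURCE B (Python) =====
-- def sb_tree(rn, n):
--     cur = list(rn)
--     for _ in range(n):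
--         nxt = []
--         for (a, b), (c, d) in zip(cur, cur[1:]):
--             nxt.append((a, b))
--             nxt.append((a + c, b + d))
--         nxt.append(cur[-1])
--         cur = nxt
--     return cur
-- ===== Notes on version B (the rewrite author's own statement) =====
-- stated objective: alternative
-- what changed: Replaces A's recursion with an index-based generator by an iterative loop that rebuilds the list from adjacent pairs via zip; no recursion, no generator, no indexing by position.
import Mathlib
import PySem

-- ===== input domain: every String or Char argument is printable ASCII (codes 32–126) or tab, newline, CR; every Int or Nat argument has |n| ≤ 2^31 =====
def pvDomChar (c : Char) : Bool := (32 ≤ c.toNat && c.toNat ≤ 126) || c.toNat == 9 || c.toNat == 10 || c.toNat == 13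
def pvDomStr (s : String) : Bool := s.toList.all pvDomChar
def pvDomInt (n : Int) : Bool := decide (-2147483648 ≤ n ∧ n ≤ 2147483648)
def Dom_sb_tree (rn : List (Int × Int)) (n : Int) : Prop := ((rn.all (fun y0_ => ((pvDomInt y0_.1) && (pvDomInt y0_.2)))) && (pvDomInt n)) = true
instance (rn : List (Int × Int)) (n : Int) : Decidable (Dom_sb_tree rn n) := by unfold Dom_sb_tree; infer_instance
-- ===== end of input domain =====

-- B replaces A's recursion over an index-based generator by an iterative loop rebuilding the
-- list from adjacent pairs via zip (objective: alternative decomposition, same cost).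

-- ===== PORT A =====
-- list(new_rn()): for i in range(len(rn)-1): yield rn[i]; yield the mediant; finally yield rn[-1].
-- Indexing rn[i], rn[i+1] is always in range here, so pyGetD with a dummy default is exact;
-- rn[-1] is exact on Pre_ (rn nonempty whenever it is evaluated).
def sb_tree_newRn (rn : List (Int × Int)) : List (Int × Int) :=
  ((PySem.List.pyRange 0 ((rn.length : Int) - 1) 1).foldl
      (fun acc i =>
        acc ++ [PySem.List.pyGetD rn i (0, 0),
                ((PySem.List.pyGetD rn i (0, 0)).1 + (PySem.List.pyGetD rn (i + 1) (0, 0)).1,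
                 (PySem.List.pyGetD rn i (0, 0)).2 + (PySem.List.pyGetD rn (i + 1) (0, 0)).2)]) [])
    ++ [(PySem.List.pyGet? rn (-1)).getD (0, 0)]

-- 'if not n: return rn; return sb_tree(list(new_rn()), n-1)'.  The guard is 'n ≤ 0' instead of
-- 'n = 0' only to make the recursion total: for n < 0 the Python diverges (RecursionError),
-- and those inputs are excluded by Pre_sb_tree.
def sb_tree (rn : List (Int × Int)) (n : Int) : List (Int × Int) :=
  if n ≤ 0 then rn
  else sb_tree (sb_tree_newRn rn) (n - 1)
termination_by n.toNat
decreasing_by omega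

-- ===== PORT B =====
-- one pass of B's loop body: walk zip(cur, cur[1:]) appending the pair and its mediant, then cur[-1]
def sb_tree_step (cur : List (Int × Int)) : List (Int × Int) :=
  ((cur.zip (PySem.List.slice cur (some 1) none)).foldl
      (fun nxt p => nxt ++ [(p.1.1, p.1.2), (p.1.1 + p.2.1, p.1.2 + p.2.2)]) [])
    ++ [(PySem.List.pyGet? cur (-1)).getD (0, 0)]

-- 'cur = list(rn); for _ in range(n): cur = step(cur); return cur'  (range(n) has n.toNat items)
def sb_tree_alt (rn : List (Int × Int)) (n : Int) : List (Int × Int) :=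
  (List.range n.toNat).foldl (fun cur _ => sb_tree_step cur) rn

-- ===== PRECONDITION & SPEC =====
-- A raises RecursionError for n < 0 and IndexError (rn[-1]) for rn = [] with n ≠ 0; Pre_ excludes exactly those.
def Pre_sb_tree (rn : List (Int × Int)) (n : Int) : Prop := 0 ≤ n ∧ (n = 0 ∨ rn ≠ [])
instance (rn : List (Int × Int)) (n : Int) : Decidable (Pre_sb_tree rn n) := by unfold Pre_sb_tree; infer_instance
def pvWitness_sb_tree : (List (Int × Int)) × Int := ([(0, 1), (1, 0)], 2)

def Spec_sb_tree (rn : List (Int × Int)) (n : Int) (out : List (Int × Int)) : Prop := out = sb_tree_alt rn n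
instance (rn : List (Int × Int)) (n : Int) (out : List (Int × Int)) : Decidable (Spec_sb_tree rn n out) := by unfold Spec_sb_tree; infer_instance

-- ===== CLAIM (what is proved, stated in full; the proofs are below) =====
def Claim_equal_sb_tree : Prop := ∀ (rn : List (Int × Int)) (n : Int), Dom_sb_tree rn n → Pre_sb_tree rn n → Spec_sb_tree rn n (sb_tree rn n)

-- ===== LEMMAS AND PROOFS =====

theorem pvFoldl_append_flatMap {β γ : Type} (l : List β) (f : β → List γ) (acc : List γ) :
    l.foldl (fun a x => a ++ f x) acc = acc ++ l.flatMap f := by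
  induction l generalizing acc with
  | nil => simp
  | cons x t ih => simp [List.foldl_cons, ih]

-- the two inner walks produce the same list of "element, mediant" blocks
theorem pvCore (l : List (Int × Int)) :
    (List.range (l.length - 1)).flatMap
        (fun k => [l.getD k (0, 0),
                   ((l.getD k (0, 0)).1 + (l.getD (k + 1) (0, 0)).1,
                    (l.getD k (0, 0)).2 + (l.getD (k + 1) (0, 0)).2)])
      = (l.zip l.tail).flatMap
          (fun p => [(p.1.1, p.1.2), (p.1.1 + p.2.1, p.1.2 + p.2.2)]) := by
  induction l with
  | nil => simp
  | cons x t ih =>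
    cases t with
    | nil => simp
    | cons y r =>
      have h1 : (x :: y :: r : List (Int × Int)).length - 1 = ((y :: r : List (Int × Int)).length - 1) + 1 := by
        simp
      rw [h1, List.range_succ_eq_map, List.flatMap_cons, List.flatMap_map]
      simp only [List.zip_cons_cons, List.tail_cons, List.flatMap_cons] at ih ⊢
      rw [← ih]
      rfl

theorem pvStep_eq (l : List (Int × Int)) : sb_tree_newRn l = sb_tree_step l := by
  unfold sb_tree_newRn sb_tree_step
  rw [pvFoldl_append_flatMap, pvFoldl_append_flatMap, PySem.List.slice_from_one,
      PySem.List.pyRange_one]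
  have hlen : ((l.length : Int) - 1 - 0).toNat = l.length - 1 := by omega
  rw [List.flatMap_map]
  simp only [zero_add, PySem.List.pyGetD_natCast, hlen]
  have : ∀ k : Nat, PySem.List.pyGetD l ((k : Int) + 1) (0, 0) = l.getD (k + 1) (0, 0) := by
    intro k
    have : ((k : Int) + 1) = ((k + 1 : Nat) : Int) := by push_cast; ring
    rw [this, PySem.List.pyGetD_natCast]
  simp only [this, List.nil_append, pvCore]

theorem pvFoldl_range_iterate {α : Type} (f : α → α) (k : Nat) (a : α) :
    (List.range k).foldl (fun x _ => f x) a = f^[k] a := by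
  induction k generalizing a with
  | zero => simp
  | succ m ih =>
    rw [List.range_succ_eq_map, List.foldl_cons, List.foldl_map, ih,
        Function.iterate_succ_apply]

theorem pvMain (k : Nat) : ∀ (n : Int), n.toNat = k → ∀ rn, sb_tree rn n = sb_tree_alt rn n := by
  induction k with
  | zero =>
    intro n hn rn
    have hle : n ≤ 0 := by omega
    rw [sb_tree, if_pos hle]
    unfold sb_tree_alt
    rw [hn]
    simp
  | succ m ih =>
    intro n hn rn
    have hgt : ¬ n ≤ 0 := by omega
    rw [sb_tree, if_neg hgt]
    have hm : (n - 1).toNat = m := by omega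
    rw [ih (n - 1) hm, pvStep_eq]
    unfold sb_tree_alt
    rw [hn, hm, pvFoldl_range_iterate, pvFoldl_range_iterate, Function.iterate_succ_apply]

-- ===== VERDICT (by name: the statement is the Claim_ definition above) =====
theorem sb_tree_spec : Claim_equal_sb_tree := by
  intro rn n _ _
  unfold Spec_sb_tree
  exact pvMain n.toNat n rfl rn
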